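-- pv_equiv track=rewrite | github.com/SpicyChicken6/VariantsViewer | backend/annotation/adapters/vep_adapter.py | _pick_tx
-- ===== SOURCE A (Python) =====
-- def _pick_tx(transcripts: list[dict]) -> dict | None:
--     if not transcripts:
--         return None
--     return (
--         next((tx for tx in transcripts if tx.get('mane_plus_clinical')), None)
--         or next((tx for tx in transcripts if tx.get('mane_select')), None)
--         or next((tx for tx in transcripts if tx.get('canonical') and tx.get('protein_coding')), None)
--         or transcripts[0]
--     )
-- ===== SOURCE B (Python) =====
-- def _pick_tx(transcripts: list[dict]) -> dict | None:
--     best = None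
--     best_score = -1
--     for tx in transcripts:
--         if tx.get('mane_plus_clinical'):
--             score = 3
--         elif tx.get('mane_select'):
--             score = 2
--         elif tx.get('canonical') and tx.get('protein_coding'):
--             score = 1
--         else:
--             score = 0
--         if score > best_score:
--             best, best_score = tx, score
--     return best
-- ===== Notes on version B (the rewrite author's own statement) =====
-- stated objective: alternative
-- what changed: Replaces A's four separate generator scans over the list (one per priority tier plus the fallback) by a single pass that assigns each transcript a numeric priority score and keeps the earliest transcript with the strictly highest score.
import Mathlib
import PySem

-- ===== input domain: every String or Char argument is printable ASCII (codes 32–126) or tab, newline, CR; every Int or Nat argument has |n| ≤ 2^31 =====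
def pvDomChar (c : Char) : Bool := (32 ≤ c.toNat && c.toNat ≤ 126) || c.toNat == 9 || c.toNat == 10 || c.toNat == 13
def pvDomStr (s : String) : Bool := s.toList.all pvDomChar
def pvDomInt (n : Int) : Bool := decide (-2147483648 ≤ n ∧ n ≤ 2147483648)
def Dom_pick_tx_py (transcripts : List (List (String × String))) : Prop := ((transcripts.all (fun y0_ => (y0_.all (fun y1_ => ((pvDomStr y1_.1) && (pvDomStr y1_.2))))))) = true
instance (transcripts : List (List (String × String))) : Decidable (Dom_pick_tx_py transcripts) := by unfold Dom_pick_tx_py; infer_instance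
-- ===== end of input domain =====

-- B replaces A's four separate generator scans of the list by one pass keeping the earliest
-- transcript with the strictly highest numeric priority score (objective: alternative, same cost class).

-- Python truthiness of tx.get(k): key present with a nonempty string value (first match, per the
-- association-list convention for dicts).
def pvGetTruthy (tx : List (String × String)) (k : String) : Bool :=
  match tx.lookup k with
  | some v => v != ""
  | none => false

-- ===== PORT A =====
-- Python 'x or y' on Option dict operands (None and the empty dict are falsy)
def pvOrOO (x y : Option (List (String × String))) : Option (List (String × String)) :=
  match x with
  | some d => if d.isEmpty then y else some d
  | none => y

-- Python 'x or y' where y is a dict (the final '... or transcripts[0]')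
def pvOrOD (x : Option (List (String × String))) (y : List (String × String)) : List (String × String) :=
  match x with
  | some d => if d.isEmpty then y else d
  | none => y

def pick_tx_py (transcripts : List (List (String × String))) : Option (List (String × String)) :=
  match transcripts with
  | [] => none
  | t0 :: _ =>
    let n1 := transcripts.find? (fun tx => pvGetTruthy tx "mane_plus_clinical")
    let n2 := transcripts.find? (fun tx => pvGetTruthy tx "mane_select")
    let n3 := transcripts.find? (fun tx => pvGetTruthy tx "canonical" && pvGetTruthy tx "protein_coding")
    some (pvOrOD (pvOrOO (pvOrOO n1 n2) n3) t0)

-- ===== PORT B =====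
def pvScore (tx : List (String × String)) : Int :=
  if pvGetTruthy tx "mane_plus_clinical" then 3
  else if pvGetTruthy tx "mane_select" then 2
  else if pvGetTruthy tx "canonical" && pvGetTruthy tx "protein_coding" then 1
  else 0

def pvAltLoop : List (List (String × String)) → Option (List (String × String)) → Int → Option (List (String × String))
  | [], best, _ => best
  | tx :: rest, best, bs =>
    if pvScore tx > bs then pvAltLoop rest (some tx) (pvScore tx) else pvAltLoop rest best bs

def pick_tx_py_alt (transcripts : List (List (String × String))) : Option (List (String × String)) :=
  pvAltLoop transcripts none (-1)

-- ===== PRECONDITION & SPEC =====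
def Spec_pick_tx_py (transcripts : List (List (String × String))) (out : Option (List (String × String))) : Prop := out = pick_tx_py_alt transcripts
instance (transcripts : List (List (String × String))) (out : Option (List (String × String))) : Decidable (Spec_pick_tx_py transcripts out) := by unfold Spec_pick_tx_py; infer_instance

-- ===== CLAIM (what is proved, stated in full; the proofs are below) =====
def Claim_equal_pick_tx_py : Prop := ∀ (transcripts : List (List (String × String))), Dom_pick_tx_py transcripts → Spec_pick_tx_py transcripts (pick_tx_py transcripts)

-- ===== LEMMAS AND PROOFS =====

theorem pvGetTruthy_ne_nil {tx : List (String × String)} {k : String}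
    (h : pvGetTruthy tx k = true) : tx.isEmpty = false := by
  cases tx <;> simp_all [pvGetTruthy]

theorem pvScore_le_three (t : List (String × String)) : pvScore t ≤ 3 := by
  unfold pvScore; split_ifs <;> decide

theorem pvScore_mpc {t : List (String × String)}
    (h : pvGetTruthy t "mane_plus_clinical" = true) : pvScore t = 3 := by
  simp [pvScore, h]

theorem pvScore_le_two {t : List (String × String)}
    (h : pvGetTruthy t "mane_plus_clinical" = false) : pvScore t ≤ 2 := by
  simp only [pvScore, h, Bool.false_eq_true, if_false]; split_ifs <;> decide

theorem pvScore_ms {t : List (String × String)}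
    (h1 : pvGetTruthy t "mane_plus_clinical" = false)
    (h2 : pvGetTruthy t "mane_select" = true) : pvScore t = 2 := by
  simp [pvScore, h1, h2]

theorem pvScore_le_one {t : List (String × String)}
    (h1 : pvGetTruthy t "mane_plus_clinical" = false)
    (h2 : pvGetTruthy t "mane_select" = false) : pvScore t ≤ 1 := by
  simp only [pvScore, h1, h2, Bool.false_eq_true, if_false]; split_ifs <;> decide

theorem pvScore_cp {t : List (String × String)}
    (h1 : pvGetTruthy t "mane_plus_clinical" = false)
    (h2 : pvGetTruthy t "mane_select" = false)
    (h3 : (pvGetTruthy t "canonical" && pvGetTruthy t "protein_coding") = true) : pvScore t = 1 := by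
  simp [pvScore, h1, h2, h3]

theorem pvScore_zero {t : List (String × String)}
    (h1 : pvGetTruthy t "mane_plus_clinical" = false)
    (h2 : pvGetTruthy t "mane_select" = false)
    (h3 : (pvGetTruthy t "canonical" && pvGetTruthy t "protein_coding") = false) : pvScore t = 0 := by
  simp [pvScore, h1, h2, h3]

-- once the running best score dominates every remaining score, the loop keeps its best
theorem pvAltLoop_const : ∀ (ts : List (List (String × String)))
    (best : Option (List (String × String))) (bs : Int),
    (∀ t ∈ ts, pvScore t ≤ bs) → pvAltLoop ts best bs = best := by
  intro ts
  induction ts with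
  | nil => intro best bs _; rfl
  | cons t rest ih =>
    intro best bs h
    have ht : ¬ (pvScore t > bs) := not_lt.mpr (h t (by simp))
    rw [pvAltLoop, if_neg ht]
    exact ih best bs (fun x hx => h x (List.mem_cons_of_mem _ hx))

-- tier 3: the loop returns the first transcript with mane_plus_clinical
theorem pvAltLoop_mpc : ∀ (ts : List (List (String × String)))
    (best : Option (List (String × String))) (bs : Int) (d : List (String × String)),
    bs < 3 →
    ts.find? (fun tx => pvGetTruthy tx "mane_plus_clinical") = some d →
    pvAltLoop ts best bs = some d := by
  intro ts
  induction ts with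
  | nil => intro _ _ _ _ h; simp at h
  | cons t rest ih =>
    intro best bs d hbs hf
    by_cases hp : pvGetTruthy t "mane_plus_clinical" = true
    · rw [List.find?_cons_of_pos (p := fun tx => pvGetTruthy tx "mane_plus_clinical") hp, Option.some_inj] at hf
      subst hf
      have hs := pvScore_mpc hp
      rw [pvAltLoop, hs, if_pos hbs]
      exact pvAltLoop_const rest (some t) 3 (fun x _ => pvScore_le_three x)
    · rw [List.find?_cons_of_neg (p := fun tx => pvGetTruthy tx "mane_plus_clinical") (by simpa using hp)] at hf
      have hs : pvScore t ≤ 2 := pvScore_le_two (by simpa using hp)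
      rw [pvAltLoop]
      by_cases hgt : pvScore t > bs
      · rw [if_pos hgt]; exact ih (some t) (pvScore t) d (by omega) hf
      · rw [if_neg hgt]; exact ih best bs d hbs hf

-- tier 2: no mane_plus_clinical anywhere, first with mane_select wins
theorem pvAltLoop_ms : ∀ (ts : List (List (String × String)))
    (best : Option (List (String × String))) (bs : Int) (d : List (String × String)),
    bs < 2 →
    (∀ t ∈ ts, pvGetTruthy t "mane_plus_clinical" = false) →
    ts.find? (fun tx => pvGetTruthy tx "mane_select") = some d →
    pvAltLoop ts best bs = some d := by
  intro ts
  induction ts with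
  | nil => intro _ _ _ _ _ h; simp at h
  | cons t rest ih =>
    intro best bs d hbs hno hf
    have hnot := hno t (by simp)
    have hnor : ∀ x ∈ rest, pvGetTruthy x "mane_plus_clinical" = false :=
      fun x hx => hno x (List.mem_cons_of_mem _ hx)
    by_cases hp : pvGetTruthy t "mane_select" = true
    · rw [List.find?_cons_of_pos (p := fun tx => pvGetTruthy tx "mane_select") hp, Option.some_inj] at hf
      subst hf
      have hs := pvScore_ms hnot hp
      rw [pvAltLoop, hs, if_pos hbs]
      exact pvAltLoop_const rest (some t) 2 (fun x hx => pvScore_le_two (hnor x hx))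
    · rw [List.find?_cons_of_neg (p := fun tx => pvGetTruthy tx "mane_select") (by simpa using hp)] at hf
      have hs : pvScore t ≤ 1 := pvScore_le_one hnot (by simpa using hp)
      rw [pvAltLoop]
      by_cases hgt : pvScore t > bs
      · rw [if_pos hgt]; exact ih (some t) (pvScore t) d (by omega) hnor hf
      · rw [if_neg hgt]; exact ih best bs d hbs hnor hf

-- tier 1: no MANE flags anywhere, first canonical protein-coding wins
theorem pvAltLoop_cp : ∀ (ts : List (List (String × String)))
    (best : Option (List (String × String))) (bs : Int) (d : List (String × String)),
    bs < 1 →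
    (∀ t ∈ ts, pvGetTruthy t "mane_plus_clinical" = false) →
    (∀ t ∈ ts, pvGetTruthy t "mane_select" = false) →
    ts.find? (fun tx => pvGetTruthy tx "canonical" && pvGetTruthy tx "protein_coding") = some d →
    pvAltLoop ts best bs = some d := by
  intro ts
  induction ts with
  | nil => intro _ _ _ _ _ _ h; simp at h
  | cons t rest ih =>
    intro best bs d hbs hno1 hno2 hf
    have h1 := hno1 t (by simp)
    have h2 := hno2 t (by simp)
    have h1r : ∀ x ∈ rest, pvGetTruthy x "mane_plus_clinical" = false :=
      fun x hx => hno1 x (List.mem_cons_of_mem _ hx)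
    have h2r : ∀ x ∈ rest, pvGetTruthy x "mane_select" = false :=
      fun x hx => hno2 x (List.mem_cons_of_mem _ hx)
    by_cases hp : (pvGetTruthy t "canonical" && pvGetTruthy t "protein_coding") = true
    · rw [List.find?_cons_of_pos (p := fun tx => pvGetTruthy tx "canonical" && pvGetTruthy tx "protein_coding") hp, Option.some_inj] at hf
      subst hf
      have hs := pvScore_cp h1 h2 hp
      rw [pvAltLoop, hs, if_pos hbs]
      exact pvAltLoop_const rest (some t) 1
        (fun x hx => pvScore_le_one (h1r x hx) (h2r x hx))
    · rw [List.find?_cons_of_neg (p := fun tx => pvGetTruthy tx "canonical" && pvGetTruthy tx "protein_coding") (by simpa using hp)] at hf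
      have hs : pvScore t = 0 := pvScore_zero h1 h2 (by simpa using hp)
      rw [pvAltLoop]
      by_cases hgt : pvScore t > bs
      · rw [if_pos hgt]; exact ih (some t) (pvScore t) d (by omega) h1r h2r hf
      · rw [if_neg hgt]; exact ih best bs d hbs h1r h2r hf

-- tier 0: no flags anywhere, the first transcript wins
theorem pvAltLoop_head (t : List (String × String)) (rest : List (List (String × String)))
    (hno1 : ∀ x ∈ t :: rest, pvGetTruthy x "mane_plus_clinical" = false)
    (hno2 : ∀ x ∈ t :: rest, pvGetTruthy x "mane_select" = false)
    (hno3 : ∀ x ∈ t :: rest, (pvGetTruthy x "canonical" && pvGetTruthy x "protein_coding") = false) :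
    pvAltLoop (t :: rest) none (-1) = some t := by
  have hs : pvScore t = 0 := pvScore_zero (hno1 t (by simp)) (hno2 t (by simp)) (hno3 t (by simp))
  rw [pvAltLoop, hs, if_pos (by decide)]
  exact pvAltLoop_const rest (some t) 0 (fun x hx => by
    rw [pvScore_zero (hno1 x (List.mem_cons_of_mem _ hx)) (hno2 x (List.mem_cons_of_mem _ hx))
      (hno3 x (List.mem_cons_of_mem _ hx))])

-- ===== VERDICT (by name: the statement is the Claim_ definition above) =====
theorem pick_tx_py_spec : Claim_equal_pick_tx_py := by
  intro ts _
  unfold Spec_pick_tx_py pick_tx_py pick_tx_py_alt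
  match ts with
  | [] => rfl
  | t0 :: rest =>
    simp only
    rcases hf1 : (t0 :: rest).find? (fun tx => pvGetTruthy tx "mane_plus_clinical") with _ | d1
    · rcases hf2 : (t0 :: rest).find? (fun tx => pvGetTruthy tx "mane_select") with _ | d2
      · rcases hf3 : (t0 :: rest).find? (fun tx => pvGetTruthy tx "canonical" && pvGetTruthy tx "protein_coding") with _ | d3
        · -- all tiers empty: A falls back to transcripts[0]
          rw [pvOrOO, pvOrOO, pvOrOD]
          have h1 := List.find?_eq_none.mp hf1
          have h2 := List.find?_eq_none.mp hf2
          have h3 := List.find?_eq_none.mp hf3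
          exact (pvAltLoop_head t0 rest (fun x hx => by simpa using h1 x hx)
            (fun x hx => by simpa using h2 x hx) (fun x hx => by simpa using h3 x hx)).symm
        · -- tier 1
          have hp3 := List.find?_some hf3
          have hne := pvGetTruthy_ne_nil (Bool.and_elim_left (by simpa using hp3))
          rw [pvOrOO, pvOrOO, pvOrOD, if_neg (by simp [hne])]
          have h1 := List.find?_eq_none.mp hf1
          have h2 := List.find?_eq_none.mp hf2
          exact (pvAltLoop_cp (t0 :: rest) none (-1) d3 (by decide)
            (fun x hx => by simpa using h1 x hx) (fun x hx => by simpa using h2 x hx) hf3).symm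
      · -- tier 2
        have hp2 := List.find?_some hf2
        have hne := pvGetTruthy_ne_nil (by simpa using hp2)
        rw [pvOrOO, pvOrOO, if_neg (by simp [hne]), pvOrOD, if_neg (by simp [hne])]
        have h1 := List.find?_eq_none.mp hf1
        exact (pvAltLoop_ms (t0 :: rest) none (-1) d2 (by decide)
          (fun x hx => by simpa using h1 x hx) hf2).symm
    · -- tier 3
      have hp1 := List.find?_some hf1
      have hne := pvGetTruthy_ne_nil (by simpa using hp1)
      rw [pvOrOO, if_neg (by simp [hne]), pvOrOO, if_neg (by simp [hne]),
        pvOrOD, if_neg (by simp [hne])]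
      exact (pvAltLoop_mpc (t0 :: rest) none (-1) d1 (by decide) hf1).symm
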